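-- pv_equiv track=rewrite | github.com/Miosyo/cp2410practicals | Jesse-Purcell-Week-6/exercise_3.py | find_least_popular_friends
-- ===== SOURCE A (Python) =====
-- def find_least_popular_friends(graph):
--     smallest_friend_count = None
--     for node in graph:
--         if smallest_friend_count == None or len(graph[node]) < smallest_friend_count:
--             smallest_friend_count = len(graph[node])
--
--     smallest_friend_list = []
--     for node in graph:
--         if len(graph[node]) == smallest_friend_count:
--             smallest_friend_list.append(node)
--     return smallest_friend_list
-- ===== SOURCE B (Python) =====
-- def find_least_popular_friends(graph):
--     buckets = {}
--     for node in graph: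
--         buckets.setdefault(len(graph[node]), []).append(node)
--     if not buckets:
--         return []
--     return buckets[min(buckets)]
-- ===== Notes on version B (the rewrite author's own statement) =====
-- stated objective: alternative
-- what changed: Replaces A's two full passes (scan for the minimum count, then scan again to collect matches) by one pass building a dict from friend-count to the nodes with that count, then returning the bucket of the smallest key.
import Mathlib
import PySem

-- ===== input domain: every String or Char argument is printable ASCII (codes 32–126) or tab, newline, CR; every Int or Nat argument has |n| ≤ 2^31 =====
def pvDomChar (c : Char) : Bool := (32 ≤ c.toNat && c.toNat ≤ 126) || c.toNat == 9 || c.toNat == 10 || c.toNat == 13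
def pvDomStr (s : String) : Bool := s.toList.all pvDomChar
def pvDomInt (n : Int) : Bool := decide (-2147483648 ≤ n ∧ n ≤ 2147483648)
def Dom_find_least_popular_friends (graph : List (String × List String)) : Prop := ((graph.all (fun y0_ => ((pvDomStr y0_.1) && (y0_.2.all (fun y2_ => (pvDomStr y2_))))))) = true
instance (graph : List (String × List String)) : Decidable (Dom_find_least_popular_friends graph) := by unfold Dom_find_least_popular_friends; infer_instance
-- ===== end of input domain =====

-- B builds one dict from friend-count to the nodes having that count, then returns the
-- bucket of the smallest key, instead of A's two passes (min scan, then filter scan).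

-- ===== PORT A =====
-- `graph` is a Python dict: we marshal the association list through PySem.Dict.ofList
-- (duplicate keys collapse as in dict(...)); `for node in graph` with `graph[node]`
-- is the fold over d.items (the looked-up value is the pair's value).
def find_least_popular_friends (graph : List (String × List String)) : List String :=
  let d := PySem.Dict.ofList graph
  let s := d.items.foldl (fun (m : Option Int) p =>
      match m with
      | none => some ((p.2.length : Int))
      | some v => if ((p.2.length : Int)) < v then some ((p.2.length : Int)) else some v) none
  d.items.foldl (fun acc p => if some ((p.2.length : Int)) = s then acc ++ [p.1] else acc) []

-- ===== PORT B =====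
def find_least_popular_friends_alt (graph : List (String × List String)) : List String :=
  let g := PySem.Dict.ofList graph
  let b := g.items.foldl (fun (d : PySem.Dict Int (List String)) p =>
      d.modify ((p.2.length : Int)) [] (· ++ [p.1])) PySem.Dict.empty
  match PySem.List.min? b.keys (fun k => k) with
  | none => []
  | some k => b.getD k []

-- ===== PRECONDITION & SPEC =====
def Spec_find_least_popular_friends (graph : List (String × List String)) (out : List String) : Prop := out = find_least_popular_friends_alt graph
instance (graph : List (String × List String)) (out : List String) : Decidable (Spec_find_least_popular_friends graph out) := by unfold Spec_find_least_popular_friends; infer_instance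

-- ===== CLAIM (what is proved, stated in full; the proofs are below) =====
def Claim_equal_find_least_popular_friends : Prop := ∀ (graph : List (String × List String)), Dom_find_least_popular_friends graph → Spec_find_least_popular_friends graph (find_least_popular_friends graph)

-- ===== LEMMAS AND PROOFS =====

def pvKey (p : String × List String) : Int := (p.2.length : Int)

lemma pv_minfold_eq (ℓ : List (String × List String)) (v : Int) :
    ℓ.foldl (fun (m : Option Int) p =>
      match m with
      | none => some (pvKey p)
      | some w => if pvKey p < w then some (pvKey p) else some w) (some v)
    = some (ℓ.foldl (fun a p => min a (pvKey p)) v) := by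
  induction ℓ generalizing v with
  | nil => rfl
  | cons p t ih =>
    simp only [List.foldl_cons]
    rw [show (if pvKey p < v then some (pvKey p) else some v) = some (min v (pvKey p)) from by
      split_ifs with h <;> simp [min_def] <;> omega]
    exact ih _

lemma pv_fmin_mem (xs : List Int) : ∀ v, xs.foldl min v ∈ v :: xs := by
  induction xs with
  | nil => intro v; simp
  | cons k t ih =>
    intro v
    rw [List.foldl_cons]
    rcases List.mem_cons.1 (ih (min v k)) with h | h
    · rcases min_choice v k with hm | hm
      · rw [h, hm]; exact List.mem_cons_self
      · rw [h, hm]; exact List.mem_cons.2 (Or.inr List.mem_cons_self)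
    · exact List.mem_cons.2 (Or.inr (List.mem_cons.2 (Or.inr h)))

lemma pv_fmin_le (xs : List Int) : ∀ v y, y ∈ v :: xs → xs.foldl min v ≤ y := by
  induction xs with
  | nil =>
    intro v y h
    rw [List.mem_singleton] at h
    subst h; simp
  | cons k t ih =>
    intro v y h
    rw [List.foldl_cons]
    rcases List.mem_cons.1 h with h0 | h'
    · rw [h0]
      exact le_trans (ih (min v k) _ List.mem_cons_self) (min_le_left _ _)
    · rcases List.mem_cons.1 h' with h0 | h''
      · rw [h0]
        exact le_trans (ih (min v k) _ List.mem_cons_self) (min_le_right _ _)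
      · exact ih (min v k) y (List.mem_cons.2 (Or.inr h''))

lemma pv_appendfold (ℓ : List (String × List String)) (c : Int) : ∀ (acc : List String),
    ℓ.foldl (fun acc p => if pvKey p = c then acc ++ [p.1] else acc) acc
    = acc ++ (ℓ.filter (fun p => pvKey p == c)).map (·.1) := by
  induction ℓ with
  | nil => intro acc; simp
  | cons p t ih =>
    intro acc
    by_cases h : pvKey p = c
    · rw [List.foldl_cons, if_pos h, ih]
      simp [h]
    · rw [List.foldl_cons, if_neg h, ih]
      simp [h]

lemma pv_bucket_getD (ℓ : List (String × List String)) (c : Int) :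
    (ℓ.foldl (fun (d : PySem.Dict Int (List String)) p =>
        d.modify (pvKey p) [] (· ++ [p.1])) PySem.Dict.empty).getD c []
    = (ℓ.filter (fun p => pvKey p == c)).map (·.1) := by
  have h1 : ℓ.foldl (fun (d : PySem.Dict Int (List String)) p =>
        d.modify (pvKey p) [] (· ++ [p.1])) PySem.Dict.empty
      = (ℓ.map (fun p => (pvKey p, p.1))).foldl
        (fun (d : PySem.Dict Int (List String)) q => d.modify q.1 [] (· ++ [q.2])) PySem.Dict.empty := by
    rw [List.foldl_map]
  rw [h1, PySem.Dict.getD_foldl_modify_append, PySem.Dict.getD_empty]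
  simp [List.filter_map, List.map_map, Function.comp_def]

lemma pv_bucket_keys (ℓ : List (String × List String)) :
    (ℓ.foldl (fun (d : PySem.Dict Int (List String)) p =>
        d.modify (pvKey p) [] (· ++ [p.1])) PySem.Dict.empty).keys
    = PySem.Set.ofList (ℓ.map pvKey) := by
  rw [PySem.Dict.keys_foldl_modify_key]
  simp [PySem.Set.update_nil_left]

lemma pv_core (ℓ : List (String × List String)) :
    (ℓ.foldl (fun acc p => if some (pvKey p) =
        (ℓ.foldl (fun (m : Option Int) p =>
          match m with
          | none => some (pvKey p)
          | some v => if pvKey p < v then some (pvKey p) else some v) none)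
        then acc ++ [p.1] else acc) [])
    = (match PySem.List.min?
          (ℓ.foldl (fun (d : PySem.Dict Int (List String)) p =>
            d.modify (pvKey p) [] (· ++ [p.1])) PySem.Dict.empty).keys (fun k => k) with
       | none => []
       | some k =>
         (ℓ.foldl (fun (d : PySem.Dict Int (List String)) p =>
            d.modify (pvKey p) [] (· ++ [p.1])) PySem.Dict.empty).getD k []) := by
  cases ℓ with
  | nil => rfl
  | cons p0 t =>
    have hs : (p0 :: t).foldl (fun (m : Option Int) p =>
        match m with
        | none => some (pvKey p)
        | some v => if pvKey p < v then some (pvKey p) else some v) none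
        = some ((t.map pvKey).foldl min (pvKey p0)) := by
      rw [List.foldl_cons]
      show t.foldl (fun (m : Option Int) p =>
        match m with
        | none => some (pvKey p)
        | some v => if pvKey p < v then some (pvKey p) else some v) (some (pvKey p0)) = _
      rw [pv_minfold_eq, List.foldl_map]
    set M := (t.map pvKey).foldl min (pvKey p0) with hM
    have hmem : M ∈ pvKey p0 :: t.map pvKey := pv_fmin_mem _ _
    have hle : ∀ y ∈ pvKey p0 :: t.map pvKey, M ≤ y := fun y hy => pv_fmin_le _ _ _ hy
    have hkeys := pv_bucket_keys (p0 :: t)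
    have hmemxs : M ∈ (p0 :: t).map pvKey := by simpa using hmem
    have hMkeys : M ∈ PySem.Set.ofList ((p0 :: t).map pvKey) :=
      (PySem.Set.mem_ofList _ _).2 hmemxs
    have hne : PySem.Set.ofList ((p0 :: t).map pvKey) ≠ [] := by
      intro h; rw [h] at hMkeys; exact absurd hMkeys (List.not_mem_nil)
    obtain ⟨m, hm⟩ : ∃ m, PySem.List.min? (PySem.Set.ofList ((p0 :: t).map pvKey)) (fun k => k) = some m := by
      cases h : PySem.List.min? (PySem.Set.ofList ((p0 :: t).map pvKey)) (fun k => k) with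
      | none => exact absurd ((PySem.List.min?_eq_none_iff _ _).1 h) hne
      | some m => exact ⟨m, rfl⟩
    have hmM : m = M := by
      have h1 : m ∈ PySem.Set.ofList ((p0 :: t).map pvKey) := PySem.List.min?_mem hm
      have h2 : m ∈ (p0 :: t).map pvKey := (PySem.Set.mem_ofList _ _).1 h1
      have h3 : M ≤ m := hle m (by simpa using h2)
      have h4 : m ≤ M := PySem.List.min?_isMin hm M hMkeys
      omega
    rw [hs, hkeys, hm, hmM]
    simp only [Option.some.injEq]
    rw [pv_bucket_getD, pv_appendfold]
    simp

-- ===== VERDICT (by name: the statement is the Claim_ definition above) =====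
theorem find_least_popular_friends_spec : Claim_equal_find_least_popular_friends := by
  intro graph _
  unfold Spec_find_least_popular_friends
  exact pv_core (PySem.Dict.ofList graph).items
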